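-- pv_equiv track=rewrite | github.com/gahjelle/everybody_codes | python/2024_the_kingdom_of_algorithmia/17_galactic_geometry/ec202417.py | create_constellations
-- ===== SOURCE A (Python) =====
-- def create_constellations(stars, max_distance=999):
--     """Create one or more constellations based on the given stars."""
--     first, *rest = stars
--     distances = {star: (manhattan(star, first), first) for star in rest}
--     constellation = []
--     while distances:
--         new_star, (distance, from_star) = min(
--             distances.items(), key=lambda item: item[1]
--         )
--         if distance >= max_distance:
--             return create_constellations(list(distances), max_distance) + [
--                 constellation
--             ]
--
--         constellation.append((from_star, new_star))
--         distances = {  # Inline Manhattan calculation for performance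
--             star: min(
--                 distances[star],
--                 (abs(new_star[0] - star[0]) + abs(new_star[1] - star[1]), new_star),
--             )
--             for star in distances
--             if star != new_star
--         }
--     return [constellation]
--
-- def manhattan(first, second):
--     """Find the Manhattan distance between two stars."""
--     row1, col1 = first
--     row2, col2 = second
--     return abs(row2 - row1) + abs(col2 - col1)
-- ===== SOURCE B (Python) =====
-- def create_constellations(stars, max_distance=999):
--     """Create one or more constellations based on the given stars.
--
--     Iterative Prim-restart: peel a seed star, grow its constellation by
--     repeatedly attaching the closest remaining star (best attachment found
--     by scanning the visited stars directly, no incremental distance table),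
--     and collect completed constellations, reversing them at the end.
--     """
--     constellations = []
--     remaining = list(stars)
--     while remaining:
--         visited = [remaining[0]]
--         remaining = remaining[1:]
--         constellation = []
--         while remaining:
--             best_star, best_val = remaining[0], _attach(remaining[0], visited)
--             for star in remaining[1:]:
--                 val = _attach(star, visited)
--                 if val < best_val:
--                     best_star, best_val = star, val
--             if best_val[0] >= max_distance:
--                 break
--             constellation.append((best_val[1], best_star))
--             visited.append(best_star)
--             remaining = [s for s in remaining if s != best_star]
--         constellations.append(constellation)
--     return constellations[::-1]
--
--
-- def _attach(star, visited):
--     """Cheapest (distance, anchor) attachment of star to any visited star."""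
--     return min(
--         (abs(v[0] - star[0]) + abs(v[1] - star[1]), v) for v in visited
--     )
-- ===== Notes on version B (the rewrite author's own statement) =====
-- stated objective: alternative
-- what changed: Replaces A's recursive constellation splitting and incrementally-updated distance dictionary with an iterative Prim-restart outer loop (constellations collected and reversed at the end) whose inner step recomputes each remaining star's cheapest attachment by scanning the visited list directly, with no distance table; Pre_ excludes the empty list (A raises ValueError) and lists with duplicate stars, where A's collapse of duplicates through dict keys is accidental while B treats each occurrence as a star.
-- outside the precondition, e.g. on create_constellations([(0, 0), (1, 1), (1, 1)], 1): A returns [[], []], B returns [[((1, 1), (1, 1))], []]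
import Mathlib
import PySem

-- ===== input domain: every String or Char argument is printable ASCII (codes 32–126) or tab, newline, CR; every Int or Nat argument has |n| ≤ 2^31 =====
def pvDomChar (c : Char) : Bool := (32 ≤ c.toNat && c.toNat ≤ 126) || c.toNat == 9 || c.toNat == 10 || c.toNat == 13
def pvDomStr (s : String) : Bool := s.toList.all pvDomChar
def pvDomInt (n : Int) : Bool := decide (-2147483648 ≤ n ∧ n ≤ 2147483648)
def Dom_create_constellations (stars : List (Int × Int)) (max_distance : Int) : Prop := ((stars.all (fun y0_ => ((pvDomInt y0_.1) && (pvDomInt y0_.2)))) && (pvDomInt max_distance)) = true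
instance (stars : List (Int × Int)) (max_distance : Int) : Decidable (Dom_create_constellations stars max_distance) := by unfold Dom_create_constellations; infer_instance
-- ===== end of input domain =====

-- B replaces A's recursive constellation splitting and incremental distance dictionary by an
-- iterative Prim-restart loop recomputing each star's best attachment from the visited list
-- (objective: alternative decomposition, same results on duplicate-free inputs; not claimed faster).

-- ===== PORT A =====
-- Python tuple comparison '<' on a (distance, (row, col)) value (lexicographic).
def pyLtDV (a b : Int × Int × Int) : Bool :=
  decide (a.1 < b.1) || (a.1 == b.1 && (decide (a.2.1 < b.2.1) || (a.2.1 == b.2.1 && decide (a.2.2 < b.2.2))))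

-- Python builtin min(x, y) on such values: x if x <= y else y.
def pyMinDV (a b : Int × Int × Int) : Int × Int × Int := if pyLtDV b a then b else a

def manhattan (first second : Int × Int) : Int :=
  |second.1 - first.1| + |second.2 - first.2|

-- min over a nonempty iterable keeps the FIRST extremal element (used for `min(..., key=...)`).
theorem foldl_min_mem {α : Type} (f : α → α → Bool) :
    ∀ (tl : List α) (it0 : α), tl.foldl (fun best it => if f it best then it else best) it0 ∈ it0 :: tl := by
  intro tl
  induction tl with
  | nil => simp
  | cons x xs ih =>
    intro it0
    simp only [List.foldl_cons]
    have h := ih (if f x it0 then x else it0)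
    rw [List.mem_cons] at h
    rcases h with h | h
    · rw [h]; by_cases hfx : f x it0 <;> simp [hfx]
    · simp [List.mem_cons, h]

theorem dict_insert_len {K V : Type} [BEq K] (d : PySem.Dict K V) (k : K) (v : V) :
    (d.insert k v).items.length ≤ d.items.length + 1 := by
  unfold PySem.Dict.insert
  split <;> simp

theorem dict_foldl_insert_length {K V A : Type} [BEq K] :
    ∀ (l : List A) (d0 : PySem.Dict K V) (k : A → K) (g : A → V),
      (l.foldl (fun acc p => acc.insert (k p) (g p)) d0).items.length ≤ d0.items.length + l.length := by
  intro l
  induction l with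
  | nil => simp
  | cons x xs ih =>
    intro d0 k g
    simp only [List.foldl_cons, List.length_cons]
    calc _ ≤ (d0.insert (k x) (g x)).items.length + xs.length := ih _ k g
      _ ≤ d0.items.length + 1 + xs.length := by have := dict_insert_len d0 (k x) (g x); omega
      _ = _ := by omega

theorem length_filter_ne_lt {α β : Type} [BEq α] [LawfulBEq α] (l : List (α × β)) (m : α × β)
    (hm : m ∈ l) : (l.filter (fun p => !(p.1 == m.1))).length < l.length := by
  apply List.length_filter_lt_length_iff_exists.mpr ⟨m, hm, by simp⟩

-- min(distances.items(), key=lambda item: item[1])  (first minimum)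
def minItemA (it0 : (Int × Int) × (Int × Int × Int)) (tl : List ((Int × Int) × (Int × Int × Int))) :
    (Int × Int) × (Int × Int × Int) :=
  tl.foldl (fun best it => if pyLtDV it.2 best.2 then it else best) it0

-- the dict comprehension of A's loop body: iterate the dict (keys are unique, so an item's
-- value IS distances[star]), drop new_star, take min(old value, inline-Manhattan candidate)
def updDictA (items : List ((Int × Int) × (Int × Int × Int))) (new_star : Int × Int) :
    PySem.Dict (Int × Int) (Int × Int × Int) :=
  (items.filter (fun p => !(p.1 == new_star))).foldl
    (fun acc p => acc.insert p.1 (pyMinDV p.2 (|new_star.1 - p.1.1| + |new_star.2 - p.1.2|, new_star)))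
    PySem.Dict.empty

theorem minItemA_mem (it0 : (Int × Int) × (Int × Int × Int)) (tl : List ((Int × Int) × (Int × Int × Int))) :
    minItemA it0 tl ∈ it0 :: tl := foldl_min_mem _ tl it0

theorem updDictA_length (items : List ((Int × Int) × (Int × Int × Int))) (ns : Int × Int) :
    (updDictA items ns).items.length ≤ (items.filter (fun p => !(p.1 == ns))).length := by
  have h := dict_foldl_insert_length (items.filter (fun p => !(p.1 == ns)))
    (PySem.Dict.empty (κ := Int × Int) (ν := Int × Int × Int)) Prod.fst
    (fun p => pyMinDV p.2 (|ns.1 - p.1.1| + |ns.2 - p.1.2|, ns))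
  simpa [updDictA, PySem.Dict.empty] using h

-- the `while distances:` loop of A; `Sum.inl (keys, constellation)` is the early
-- `return create_constellations(list(distances), ...) + [constellation]` path handed back
-- to the caller, `Sum.inr` the final `return [constellation]`.
def primLoopA (d : PySem.Dict (Int × Int) (Int × Int × Int))
    (constellation : List ((Int × Int) × (Int × Int))) (max_distance : Int) :
    (List (Int × Int) × List ((Int × Int) × (Int × Int))) ⊕ (List (List ((Int × Int) × (Int × Int)))) :=
  match hd : d.items with
  | [] => Sum.inr [constellation]
  | it0 :: tl =>
    let m := minItemA it0 tl
    if max_distance ≤ m.2.1 then Sum.inl (d.keys, constellation)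
    else primLoopA (updDictA d.items m.1) (constellation ++ [(m.2.2, m.1)]) max_distance
termination_by d.items.length
decreasing_by
  have hm : minItemA it0 tl ∈ d.items := by rw [hd]; exact minItemA_mem it0 tl
  exact lt_of_le_of_lt (updDictA_length d.items _) (length_filter_ne_lt d.items _ hm)

theorem primLoopA_inl_length :
    ∀ (d : PySem.Dict (Int × Int) (Int × Int × Int)) c md ks c',
      primLoopA d c md = Sum.inl (ks, c') → ks.length ≤ d.items.length := by
  intro d c md
  fun_induction primLoopA d c md with
  | case1 d c hd => intro ks c' hh; simp at hh
  | case2 d c it0 tl hd m hle =>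
    intro ks c' hh
    simp only [Sum.inl.injEq, Prod.mk.injEq] at hh
    rw [← hh.1]
    simp [PySem.Dict.keys]
  | case3 d c it0 tl hd m hle ih =>
    intro ks c' hh
    refine le_trans (ih ks c' hh) ?_
    have hm : minItemA it0 tl ∈ d.items := by rw [hd]; exact minItemA_mem it0 tl
    exact le_of_lt (lt_of_le_of_lt (updDictA_length d.items _) (length_filter_ne_lt d.items _ hm))

-- {star: (manhattan(star, first), first) for star in rest}
def initDictA (rest : List (Int × Int)) (first : Int × Int) : PySem.Dict (Int × Int) (Int × Int × Int) :=
  rest.foldl (fun d star => d.insert star (manhattan star first, first)) PySem.Dict.empty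

theorem initDictA_length (rest : List (Int × Int)) (first : Int × Int) :
    (initDictA rest first).items.length ≤ rest.length := by
  have h2 := dict_foldl_insert_length rest (PySem.Dict.empty (κ := Int × Int) (ν := Int × Int × Int))
    (fun star => star) (fun star => (manhattan star first, first))
  simpa [initDictA, PySem.Dict.empty] using h2

def create_constellations (stars : List (Int × Int)) (max_distance : Int) : List (List ((Int × Int) × (Int × Int))) :=
  match stars with
  | [] => []  -- Python raises ValueError here (unpacking); excluded by Pre_
  | first :: rest =>
    match h : primLoopA (initDictA rest first) [] max_distance with
    | Sum.inr res => res
    | Sum.inl (ks, c) => create_constellations ks max_distance ++ [c]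
termination_by stars.length
decreasing_by
  have h1 := primLoopA_inl_length (initDictA rest first) [] max_distance ks c h
  have h3 := initDictA_length rest first
  simp only [List.length_cons]
  omega

-- ===== PORT B =====
-- cheapest (distance, anchor) attachment of star to the visited list (Python min over a
-- generator; visited is never empty where B calls it)
def attach (star : Int × Int) (visited : List (Int × Int)) : Int × Int × Int :=
  match visited with
  | [] => (0, star)  -- unreachable (min of an empty generator)
  | v :: vs => vs.foldl (fun best w => pyMinDV best (|w.1 - star.1| + |w.2 - star.2|, w))
      (|v.1 - star.1| + |v.2 - star.2|, v)

-- scan of the inner `for star in remaining` loop keeping the best (star, (dist, anchor))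
def bestB (visited : List (Int × Int)) (r0 : Int × Int) (rs : List (Int × Int)) :
    (Int × Int) × (Int × Int × Int) :=
  rs.foldl (fun b s => if pyLtDV (attach s visited) b.2 then (s, attach s visited) else b)
    (r0, attach r0 visited)

theorem bestB_eq_minItemA (visited : List (Int × Int)) (r0 : Int × Int) (rs : List (Int × Int)) :
    bestB visited r0 rs = minItemA (r0, attach r0 visited) (rs.map (fun s => (s, attach s visited))) := by
  unfold bestB minItemA
  rw [List.foldl_map]

theorem bestB_mem (visited : List (Int × Int)) (r0 : Int × Int) (rs : List (Int × Int)) :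
    (bestB visited r0 rs).1 ∈ r0 :: rs := by
  rw [bestB_eq_minItemA]
  have h := minItemA_mem (r0, attach r0 visited) (rs.map (fun s => (s, attach s visited)))
  rw [List.mem_cons] at h
  rcases h with h | h
  · simp [h]
  · rcases List.mem_map.mp h with ⟨s, hs, he⟩
    right; rw [← he]; exact hs

theorem length_filter_ne_lt' {α : Type} [BEq α] [LawfulBEq α] (l : List α) (x : α)
    (hx : x ∈ l) : (l.filter (fun s => !(s == x))).length < l.length := by
  apply List.length_filter_lt_length_iff_exists.mpr ⟨x, hx, by simp⟩

-- the inner `while remaining:` loop of B: returns (leftover remaining, finished constellation)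
def primB (remaining visited : List (Int × Int)) (constellation : List ((Int × Int) × (Int × Int)))
    (max_distance : Int) : List (Int × Int) × List ((Int × Int) × (Int × Int)) :=
  match remaining with
  | [] => ([], constellation)
  | r0 :: rs =>
    let best := bestB visited r0 rs
    if max_distance ≤ best.2.1 then (r0 :: rs, constellation)
    else primB ((r0 :: rs).filter (fun s => !(s == best.1))) (visited ++ [best.1])
      (constellation ++ [(best.2.2, best.1)]) max_distance
termination_by remaining.length
decreasing_by
  exact length_filter_ne_lt' (r0 :: rs) _ (bestB_mem visited r0 rs)

theorem primB_fst_length :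
    ∀ remaining visited c md, (primB remaining visited c md).1.length ≤ remaining.length := by
  intro remaining visited c md
  fun_induction primB remaining visited c md with
  | case1 visited c => simp
  | case2 visited c r0 rs best hle => simp
  | case3 visited c r0 rs best hle ih =>
    refine le_trans ih ?_
    exact le_of_lt (length_filter_ne_lt' (r0 :: rs) _ (bestB_mem visited r0 rs))

-- the outer `while remaining:` loop of B, collecting constellations
def outerB (remaining : List (Int × Int)) (acc : List (List ((Int × Int) × (Int × Int))))
    (max_distance : Int) : List (List ((Int × Int) × (Int × Int))) :=
  match remaining with
  | [] => acc.reverse  -- constellations[::-1]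
  | first :: rest =>
    let r := primB rest [first] [] max_distance
    outerB r.1 (acc ++ [r.2]) max_distance
termination_by remaining.length
decreasing_by
  have h1 := primB_fst_length rest [first] [] max_distance
  simp only [List.length_cons]
  omega

def create_constellations_alt (stars : List (Int × Int)) (max_distance : Int) :
    List (List ((Int × Int) × (Int × Int))) :=
  outerB stars [] max_distance

-- ===== PRECONDITION & SPEC =====
-- Pre_ excludes the empty star list, on which Python A raises ValueError while unpacking, and
-- star lists with duplicate stars, on which A's collapse of the duplicates is an accident of
-- using stars as dict keys (B treats every listed occurrence as a star).
def Pre_create_constellations (stars : List (Int × Int)) (max_distance : Int) : Prop :=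
  stars ≠ [] ∧ stars.Nodup
instance (stars : List (Int × Int)) (max_distance : Int) : Decidable (Pre_create_constellations stars max_distance) := by unfold Pre_create_constellations; infer_instance
def pvWitness_create_constellations : (List (Int × Int)) × Int := ([(0, 0), (1, 2)], 999)

def Spec_create_constellations (stars : List (Int × Int)) (max_distance : Int) (out : List (List ((Int × Int) × (Int × Int)))) : Prop := out = create_constellations_alt stars max_distance
instance (stars : List (Int × Int)) (max_distance : Int) (out : List (List ((Int × Int) × (Int × Int)))) : Decidable (Spec_create_constellations stars max_distance out) := by unfold Spec_create_constellations; infer_instance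

-- ===== CLAIM (what is proved, stated in full; the proofs are below) =====
def Claim_equal_create_constellations : Prop := ∀ (stars : List (Int × Int)) (max_distance : Int), Dom_create_constellations stars max_distance → Pre_create_constellations stars max_distance → Spec_create_constellations stars max_distance (create_constellations stars max_distance)
-- ===== LEMMAS AND PROOFS =====

-- pairing a star with its best attachment (the dict entry A maintains for it)
def fab (visited : List (Int × Int)) (s : Int × Int) : (Int × Int) × (Int × Int × Int) :=
  (s, attach s visited)

theorem dict_insert_fn {V : Type} (f : (Int × Int) → V) (s0 : List (Int × Int)) (x : Int × Int) :
    (PySem.Dict.mk (s0.map (fun k => (k, f k)))).insert x (f x)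
      = PySem.Dict.mk ((PySem.Set.add s0 x).map (fun k => (k, f k))) := by
  unfold PySem.Dict.insert PySem.Set.add
  have hc : (PySem.Dict.mk (s0.map (fun k => (k, f k)))).contains x = PySem.Set.contains s0 x := by
    show ((s0.map (fun k => (k, f k))).any fun p => p.1 == x) = List.contains s0 x
    rw [List.any_map]
    have he : ((fun (p : (Int × Int) × V) => p.1 == x) ∘ (fun k => (k, f k))) = fun k => k == x := rfl
    rw [he, List.any_beq']
  rw [hc]
  by_cases hx : PySem.Set.contains s0 x = true
  · simp only [hx, if_true, PySem.Dict.mk.injEq]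
    rw [List.map_map]
    apply List.map_congr_left
    intro k hk
    simp only [Function.comp]
    by_cases hkx : (k == x) = true
    · have : k = x := by simpa using hkx
      subst this; simp
    · simp [hkx]
  · simp only [hx, if_false, Bool.false_eq_true, PySem.Dict.mk.injEq]
    rw [List.map_append]
    rfl

theorem dict_init_items {V : Type} (f : (Int × Int) → V) :
    ∀ (l : List (Int × Int)) (s0 : List (Int × Int)),
      (l.foldl (fun d x => d.insert x (f x)) (PySem.Dict.mk (s0.map (fun k => (k, f k))))).items
        = (PySem.Set.update s0 l).map (fun k => (k, f k)) := by
  intro l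
  induction l with
  | nil => intro s0; simp [PySem.Set.update]
  | cons x xs ih =>
    intro s0
    simp only [List.foldl_cons]
    rw [dict_insert_fn f s0 x, ih (PySem.Set.add s0 x)]
    simp [PySem.Set.update]

theorem att_append (s w : Int × Int) (visited : List (Int × Int)) (h : visited ≠ []) :
    attach s (visited ++ [w]) = pyMinDV (attach s visited) (|w.1 - s.1| + |w.2 - s.2|, w) := by
  match visited with
  | [] => exact absurd rfl h
  | v :: vs =>
    have h1 : attach s (v :: (vs ++ [w])) = List.foldl (fun best w => pyMinDV best (|w.1 - s.1| + |w.2 - s.2|, w)) (|v.1 - s.1| + |v.2 - s.2|, v) (vs ++ [w]) := rfl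
    have h2 : attach s (v :: vs) = List.foldl (fun best w => pyMinDV best (|w.1 - s.1| + |w.2 - s.2|, w)) (|v.1 - s.1| + |v.2 - s.2|, v) vs := rfl
    rw [List.cons_append, h1, h2, List.foldl_append]
    rfl

theorem set_update_nodup {α : Type} [BEq α] [LawfulBEq α] :
    ∀ (l : List α) (s : List α), (s ++ l).Nodup → PySem.Set.update s l = s ++ l := by
  intro l
  induction l with
  | nil => intro s h; simp [PySem.Set.update]
  | cons x xs ih =>
    intro s h
    have hx : x ∉ s := by
      intro hmem
      have h' := h
      simp only [List.nodup_append] at h'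
      exact h'.2.2 x hmem x List.mem_cons_self rfl
    have hadd : PySem.Set.add s x = s ++ [x] := by
      have hc : PySem.Set.contains s x = false := by
        simp only [PySem.Set.contains]
        simpa using hx
      simp [PySem.Set.add, hx]
    have hstep : PySem.Set.update s (x :: xs) = PySem.Set.update (s ++ [x]) xs := by
      simp [PySem.Set.update, hadd]
    rw [hstep, ih (s ++ [x]) (by simpa using h)]
    simp

theorem keys_map_fab (visited : List (Int × Int)) (l : List (Int × Int)) :
    (PySem.Dict.mk (l.map (fab visited))).keys = l := by
  simp [PySem.Dict.keys, List.map_map, Function.comp_def, fab]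

theorem primLoopA_cons (visited : List (Int × Int)) (r0 : Int × Int) (rs : List (Int × Int))
    (c : List ((Int × Int) × (Int × Int))) (md : Int) :
    primLoopA (PySem.Dict.mk ((r0 :: rs).map (fab visited))) c md =
      (let m := minItemA (fab visited r0) (rs.map (fab visited));
       if md ≤ m.2.1 then Sum.inl ((PySem.Dict.mk ((r0 :: rs).map (fab visited))).keys, c)
       else primLoopA (updDictA ((r0 :: rs).map (fab visited)) m.1) (c ++ [(m.2.2, m.1)]) md) := by
  rw [primLoopA]
  simp only [List.map_cons]

theorem updDictA_eq (visited : List (Int × Int)) (hv : visited ≠ []) (rem : List (Int × Int))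
    (hnd : rem.Nodup) (ns : Int × Int) :
    updDictA (rem.map (fab visited)) ns =
      PySem.Dict.mk ((rem.filter (fun s => !(s == ns))).map (fab (visited ++ [ns]))) := by
  unfold updDictA
  have hfil : (rem.map (fab visited)).filter (fun p => !(p.1 == ns))
      = (rem.filter (fun s => !(s == ns))).map (fab visited) := by
    rw [List.filter_map]
    rfl
  rw [hfil, List.foldl_map]
  have hfun : (fun (acc : PySem.Dict (Int × Int) (Int × Int × Int)) (s : Int × Int) =>
        acc.insert (fab visited s).1 (pyMinDV (fab visited s).2 (|ns.1 - (fab visited s).1.1| + |ns.2 - (fab visited s).1.2|, ns)))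
      = (fun acc s => acc.insert s (attach s (visited ++ [ns]))) := by
    funext acc s
    simp only [fab]
    rw [← att_append s ns visited hv]
  rw [hfun]
  apply PySem.Dict.ext
  have hinit : (PySem.Dict.empty (κ := Int × Int) (ν := Int × Int × Int))
      = PySem.Dict.mk (([] : List (Int × Int)).map (fun k => (k, attach k (visited ++ [ns])))) := rfl
  rw [hinit, dict_init_items (fun k => attach k (visited ++ [ns])) (rem.filter (fun s => !(s == ns))) []]
  have hnd' : (rem.filter (fun s => !(s == ns))).Nodup := hnd.filter _
  rw [show PySem.Set.update ([] : List (Int × Int)) (rem.filter (fun s => !(s == ns)))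
      = [] ++ rem.filter (fun s => !(s == ns)) from set_update_nodup _ [] (by simpa using hnd')]
  rfl

theorem primB_fst_nodup :
    ∀ remaining visited c md, remaining.Nodup → (primB remaining visited c md).1.Nodup := by
  intro remaining visited c md
  fun_induction primB remaining visited c md with
  | case1 visited c => intro _; simp
  | case2 visited c r0 rs best hle => intro h; exact h
  | case3 visited c r0 rs best hle ih => intro h; exact ih (h.filter _)

theorem loop_equiv :
    ∀ (n : Nat) (rem visited : List (Int × Int)) c md, rem.length ≤ n → rem.Nodup → visited ≠ [] →
      primLoopA (PySem.Dict.mk (rem.map (fab visited))) c md =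
        (if (primB rem visited c md).1.isEmpty then Sum.inr [(primB rem visited c md).2]
         else Sum.inl (primB rem visited c md)) := by
  intro n
  induction n with
  | zero =>
    intro rem visited c md hlen _ _
    have h0 : rem = [] := List.eq_nil_of_length_eq_zero (Nat.le_zero.mp hlen)
    subst h0
    rw [primLoopA, primB]
    simp only [List.map_nil, List.isEmpty_nil, if_true]
  | succ n ih =>
    intro rem visited c md hlen hnd hv
    match rem with
    | [] =>
      rw [primLoopA, primB]
      simp only [List.map_nil, List.isEmpty_nil, if_true]
    | r0 :: rs =>
      rw [primLoopA_cons]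
      have hMB : minItemA (fab visited r0) (rs.map (fab visited)) = bestB visited r0 rs :=
        (bestB_eq_minItemA visited r0 rs).symm
      simp only [hMB, keys_map_fab]
      rw [primB]
      by_cases hle : md ≤ (bestB visited r0 rs).2.1
      · rw [if_pos hle, if_pos hle]
        simp
      · rw [if_neg hle, if_neg hle]
        rw [updDictA_eq visited hv (r0 :: rs) hnd (bestB visited r0 rs).1]
        have hlt := length_filter_ne_lt' (r0 :: rs) _ (bestB_mem visited r0 rs)
        exact ih ((r0 :: rs).filter (fun s => !(s == (bestB visited r0 rs).1)))
          (visited ++ [(bestB visited r0 rs).1]) (c ++ [((bestB visited r0 rs).2.2, (bestB visited r0 rs).1)]) md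
          (by simp only [List.length_cons] at hlt hlen ⊢; omega)
          (hnd.filter _) (by simp)

theorem initDictA_eq (rest : List (Int × Int)) (first : Int × Int) (hnd : rest.Nodup) :
    initDictA rest first = PySem.Dict.mk (rest.map (fab [first])) := by
  apply PySem.Dict.ext
  have h := dict_init_items (fun star => ((manhattan star first, first) : Int × Int × Int)) rest []
  rw [show PySem.Set.update ([] : List (Int × Int)) rest = [] ++ rest from
    set_update_nodup rest [] (by simpa using hnd)] at h
  exact h

theorem outer_equiv :
    ∀ (n : Nat) (remaining : List (Int × Int)) acc md, remaining.length ≤ n → remaining.Nodup →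
      outerB remaining acc md = create_constellations remaining md ++ acc.reverse := by
  intro n
  induction n with
  | zero =>
    intro remaining acc md hlen _
    have h0 : remaining = [] := List.eq_nil_of_length_eq_zero (Nat.le_zero.mp hlen)
    subst h0
    rw [outerB, create_constellations]
    simp
  | succ n ih =>
    intro remaining acc md hlen hnd
    match remaining with
    | [] => rw [outerB, create_constellations]; simp
    | first :: rest =>
      rw [outerB, create_constellations]
      have hndr : rest.Nodup := hnd.of_cons
      have hinit : primLoopA (initDictA rest first) [] md
          = (if (primB rest [first] [] md).1.isEmpty
              then Sum.inr [(primB rest [first] [] md).2]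
              else Sum.inl (primB rest [first] [] md)) := by
        rw [initDictA_eq rest first hndr]
        exact loop_equiv rest.length rest [first] [] md le_rfl hndr (by simp)
      split
      next res h =>
        rw [hinit] at h
        by_cases he : (primB rest [first] [] md).1.isEmpty
        · rw [if_pos he] at h
          injection h with h
          rw [← h]
          have he' : (primB rest [first] [] md).1 = [] := List.isEmpty_iff.mp he
          rw [he', outerB]
          simp
        · rw [if_neg he] at h
          exact absurd h (by simp)
      next ks cc h =>
        rw [hinit] at h
        by_cases he : (primB rest [first] [] md).1.isEmpty
        · rw [if_pos he] at h
          exact absurd h (by simp)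
        · rw [if_neg he] at h
          injection h with h
          have hks : ks = (primB rest [first] [] md).1 := by rw [h]
          have hcc : cc = (primB rest [first] [] md).2 := by rw [h]
          subst hks hcc
          rw [ih (primB rest [first] [] md).1 (acc ++ [(primB rest [first] [] md).2]) md
            (by
              have h1 := primB_fst_length rest [first] [] md
              simp only [List.length_cons] at hlen
              omega)
            (primB_fst_nodup rest [first] [] md hndr)]
          simp

-- ===== VERDICT (by name: the statement is the Claim_ definition above) =====
theorem create_constellations_spec : Claim_equal_create_constellations := by
  intro stars md _ hpre
  unfold Spec_create_constellations create_constellations_alt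
  rw [outer_equiv stars.length stars [] md le_rfl hpre.2]
  simp
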